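-- pv_equiv track=rewrite | github.com/IssamMaarouf/Side-Projects-Python | Advent of Code 2024/Advent_Calender2024_20.py | find_cheat_patterns
-- ===== SOURCE A (Python) =====
-- def find_cheat_patterns(grid, cheat_patterns):
--     total_allowed_cheats = 0
--
--     # Function to count overlapping occurrences of a pattern in a string
--     def count_overlapping(string, pattern):
--         count = 0
--         start = 0
--         while True:
--             start = string.find(pattern, start)
--             if start == -1:  # No more occurrences
--                 break
--             count += 1
--             start += 1  # Move start by 1 to allow overlaps
--         return count
--
--     transposed_grid = [''.join(col) for col in zip(*grid)]
--
--     for row in grid: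
--         row_str = ''.join(row)  # Convert row to string
--         for pattern in cheat_patterns:
--             total_allowed_cheats += count_overlapping(row_str, pattern)
--
--     for col_str in transposed_grid:
--         for pattern in cheat_patterns:
--             total_allowed_cheats += count_overlapping(col_str, pattern)
--     return total_allowed_cheats
-- ===== SOURCE B (Python) =====
-- def find_cheat_patterns(grid, cheat_patterns):
--     # One counting pass: build a dict counting every window (of each distinct
--     # pattern length) of every row and column, then answer each pattern by a
--     # single dictionary lookup -- no per-pattern string searching at all.
--     lengths = set(map(len, cheat_patterns))
--     width = min(map(len, grid), default=0)
--     strings = list(grid) + [''.join(row[j] for row in grid) for j in range(width)]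
--     counts = {}
--     for s in strings:
--         n = len(s)
--         for m in lengths:
--             for i in range(n - m + 1):
--                 w = s[i:i + m]
--                 counts[w] = counts.get(w, 0) + 1
--     return sum(counts.get(p, 0) for p in cheat_patterns)
-- ===== Notes on version B (the rewrite author's own statement) =====
-- stated objective: faster
-- what changed: A searches each string once per pattern with repeated str.find scans; B never searches for a pattern: it slides windows of the distinct pattern lengths over each row and column once, tallying every window into a dict, and answers all patterns (duplicates included) by dictionary lookups.
import Mathlib
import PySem

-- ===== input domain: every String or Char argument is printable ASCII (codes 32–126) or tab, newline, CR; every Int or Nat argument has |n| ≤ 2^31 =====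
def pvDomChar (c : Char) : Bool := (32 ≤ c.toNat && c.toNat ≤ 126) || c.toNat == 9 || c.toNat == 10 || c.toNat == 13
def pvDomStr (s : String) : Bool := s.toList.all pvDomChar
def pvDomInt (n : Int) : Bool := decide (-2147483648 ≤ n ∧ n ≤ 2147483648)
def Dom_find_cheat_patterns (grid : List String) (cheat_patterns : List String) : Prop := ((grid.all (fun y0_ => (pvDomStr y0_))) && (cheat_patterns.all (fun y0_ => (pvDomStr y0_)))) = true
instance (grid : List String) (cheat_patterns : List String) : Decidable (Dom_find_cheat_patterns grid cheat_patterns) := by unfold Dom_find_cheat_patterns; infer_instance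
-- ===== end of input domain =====

-- B replaces A's per-pattern str.find scans by one counting pass: a dict tallying every
-- window of each distinct pattern length over rows and columns, answered by lookups;
-- equal totals are proved for all inputs (a timing run measured B faster).


-- ===== PORT A =====
-- the while-loop of count_overlapping: start = string.find(pattern, start); fuel s.length+1
-- bounds the number of successful finds (each strictly increases start within [0, len]),
-- so the fuel never runs out before the loop's break (proved in pvCountOverlapAux_eq below).
def pvCountOverlapAux (s p : List Char) (count : Int) (start : Int) : Nat → Int
  | 0 => count
  | fuel + 1 =>
    let f := PySem.Chars.findFrom s p start
    if f = -1 then count else pvCountOverlapAux s p (count + 1) (f + 1) fuel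

def pvCountOverlapping (s p : List Char) : Int := pvCountOverlapAux s p 0 0 (s.length + 1)

-- min of the row lengths (0 for an empty grid): the number of columns zip(*grid) yields
def pvMinLen (grid : List String) : Nat :=
  match grid.map (fun r => r.toList.length) with
  | [] => 0
  | x :: xs => xs.foldl Nat.min x

-- transposed_grid = [''.join(col) for col in zip(*grid)] : zip truncates to the shortest row,
-- so column j exists iff j < pvMinLen grid; the getD default is never used (j < every length)
def pvTransposed (grid : List String) : List (List Char) :=
  (List.range (pvMinLen grid)).map (fun j => grid.map (fun r => r.toList.getD j ' '))

def find_cheat_patterns (grid : List String) (cheat_patterns : List String) : Int :=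
  let total₁ := grid.foldl (fun acc row =>
    cheat_patterns.foldl (fun acc p => acc + pvCountOverlapping row.toList p.toList) acc) 0
  (pvTransposed grid).foldl (fun acc col =>
    cheat_patterns.foldl (fun acc p => acc + pvCountOverlapping col p.toList) acc) total₁

-- ===== PORT B =====
-- for s in strings: for m in lengths: for i in range(n-m+1): counts[s[i:i+m]] += 1
-- (strings are ported as List Char, so dict keys are List Char; the slice s[i:i+m] with
--  0 ≤ i ≤ n-m from the range is exactly (s.drop i.toNat).take m; counts[w]=counts.get(w,0)+1
--  is Dict.modify w 0 (·+1); the final sum over the dict is order-independent, so iterating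
--  the set of lengths in first-occurrence order is exact)
def pvAddWindows (counts : PySem.Dict (List Char) Int) (s : List Char) (lengths : List Nat) :
    PySem.Dict (List Char) Int :=
  lengths.foldl (fun d (m : Nat) =>
    (PySem.List.pyRange 0 ((s.length : Int) - m + 1) 1).foldl
      (fun d i => d.modify ((s.drop i.toNat).take m) 0 (· + 1)) d) counts

def find_cheat_patterns_alt (grid : List String) (cheat_patterns : List String) : Int :=
  let lengths : PySem.Set Nat := PySem.Set.ofList (cheat_patterns.map (fun p => p.toList.length))
  -- strings = list(grid) + [''.join(row[j] for row in grid) for j in range(width)];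
  -- j < width = min row length, so the getD default is never used
  let strs := grid.map String.toList ++
    (List.range (pvMinLen grid)).map (fun j => grid.map (fun r => r.toList.getD j ' '))
  let counts := strs.foldl (fun d s => pvAddWindows d s lengths) PySem.Dict.empty
  (cheat_patterns.map (fun p => counts.getD p.toList 0)).sum

-- ===== PRECONDITION & SPEC =====
def Spec_find_cheat_patterns (grid : List String) (cheat_patterns : List String) (out : Int) : Prop := out = find_cheat_patterns_alt grid cheat_patterns
instance (grid : List String) (cheat_patterns : List String) (out : Int) : Decidable (Spec_find_cheat_patterns grid cheat_patterns out) := by unfold Spec_find_cheat_patterns; infer_instance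

-- ===== CLAIM (what is proved, stated in full; the proofs are below) =====
def Claim_equal_find_cheat_patterns : Prop := ∀ (grid : List String) (cheat_patterns : List String), Dom_find_cheat_patterns grid cheat_patterns → Spec_find_cheat_patterns grid cheat_patterns (find_cheat_patterns grid cheat_patterns)

-- ===== LEMMAS AND PROOFS =====

-- number of match positions i ∈ [k, s.length] (overlapping occurrences of p from k on)
def pvMatches (s p : List Char) (k : Nat) : Nat :=
  (List.range' k (s.length + 1 - k)).countP (fun i => p.isPrefixOf (s.drop i))

theorem pvGo_eq (p s : List Char) (k : Nat) :
    PySem.Chars.find.go p s k =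
      (if p.isPrefixOf s then (k : Int) else
        match s with | [] => -1 | _ :: t => PySem.Chars.find.go p t (k + 1)) := by
  cases s <;> simp [PySem.Chars.find.go, List.isEmpty_iff, List.isPrefixOf_iff_prefix]

theorem pvPrefix_length_le {p t : List Char} (h : p.isPrefixOf t = true) :
    p.length ≤ t.length := by
  rw [List.isPrefixOf_iff_prefix] at h; exact h.length_le

-- first-occurrence specification of CPython's str.find scan
theorem pvGo_spec (p : List Char) : ∀ (s : List Char) (k : Nat),
    (PySem.Chars.find.go p s k = -1 ∧ ∀ i, ¬ p.isPrefixOf (s.drop i) = true) ∨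
    (∃ j, j ≤ s.length ∧ PySem.Chars.find.go p s k = ((k + j : Nat) : Int) ∧
      p.isPrefixOf (s.drop j) = true ∧ ∀ i, i < j → ¬ p.isPrefixOf (s.drop i) = true) := by
  intro s
  induction s with
  | nil =>
    intro k
    rw [pvGo_eq]
    by_cases h : p.isPrefixOf ([] : List Char) = true
    · right; exact ⟨0, by simp, by simp [h], by simpa using h, by omega⟩
    · left; refine ⟨by simp [h], fun i => by simpa using h⟩
  | cons a t ih =>
    intro k
    rw [pvGo_eq]
    by_cases h : p.isPrefixOf (a :: t) = true
    · right; exact ⟨0, by simp, by simp [h], by simpa using h, by omega⟩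
    · simp only [h]
      rcases ih (k + 1) with ⟨hval, hnone⟩ | ⟨j, hj, hval, hmatch, hfirst⟩
      · left
        refine ⟨hval, fun i => ?_⟩
        cases i with
        | zero => simpa using h
        | succ i' => simpa using hnone i'
      · right
        refine ⟨j + 1, by simpa using Nat.succ_le_succ hj, by rw [hval]; push_cast; ring, by simpa using hmatch, fun i hi => ?_⟩
        cases i with
        | zero => simpa using h
        | succ i' => simpa using hfirst i' (by omega)

theorem pvFindFrom_top (s p : List Char) (k : Nat) (h : k = s.length + 1) :
    PySem.Chars.findFrom s p (k : Int) none = -1 := by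
  simp [PySem.Chars.findFrom]; omega

theorem pvMatches_zero (s p : List Char) (k : Nat)
    (h : ∀ i, k ≤ i → ¬ p.isPrefixOf (s.drop i) = true) : pvMatches s p k = 0 := by
  unfold pvMatches
  apply List.countP_eq_zero.2
  intro i hi
  simp only [List.mem_range'_1] at hi
  simpa using h i hi.1

theorem pvMatches_step (s p : List Char) (k j : Nat) (hkj : k + j ≤ s.length)
    (hm : p.isPrefixOf (s.drop (k + j)) = true)
    (hfirst : ∀ i, i < j → ¬ p.isPrefixOf (s.drop (k + i)) = true) :
    pvMatches s p k = pvMatches s p (k + j + 1) + 1 := by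
  unfold pvMatches
  have hsplit : List.range' k (s.length + 1 - k) =
      List.range' k j ++ (List.range' (k + j) 1 ++ List.range' (k + j + 1) (s.length + 1 - (k + j + 1))) := by
    have he : s.length + 1 - k = j + (1 + (s.length + 1 - (k + j + 1))) := by omega
    rw [he, ← List.range'_append_1, ← List.range'_append_1]
  rw [hsplit, List.countP_append, List.countP_append]
  have h1 : (List.range' k j).countP (fun i => p.isPrefixOf (s.drop i)) = 0 := by
    apply List.countP_eq_zero.2
    intro i hi
    simp only [List.mem_range'_1] at hi
    have := hfirst (i - k) (by omega)
    simpa [Nat.add_sub_cancel' hi.1] using this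
  have h2 : (List.range' (k + j) 1).countP (fun i => p.isPrefixOf (s.drop i)) = 1 := by
    simp [List.range', hm]
  omega

theorem pvCountOverlapAux_eq : ∀ (fuel : Nat) (s p : List Char) (k : Nat) (c : Int),
    k ≤ s.length + 1 → pvMatches s p k ≤ fuel →
    pvCountOverlapAux s p c (k : Int) fuel = c + pvMatches s p k := by
  intro fuel
  induction fuel with
  | zero =>
    intro s p k c _ hf
    have : pvMatches s p k = 0 := by omega
    simp [pvCountOverlapAux, this]
  | succ fuel ih =>
    intro s p k c hk hf
    by_cases htop : k = s.length + 1
    · have h0 : pvMatches s p k = 0 := by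
        unfold pvMatches; simp [htop]
      simp [pvCountOverlapAux, pvFindFrom_top s p k htop, h0]
    · have hk' : k ≤ s.length := by omega
      rw [show pvCountOverlapAux s p c (k : Int) (fuel+1) =
        (if PySem.Chars.findFrom s p (k : Int) none = -1 then c
         else pvCountOverlapAux s p (c + 1) (PySem.Chars.findFrom s p (k : Int) none + 1) fuel) from rfl]
      rw [PySem.Chars.findFrom_natCast s p k hk']
      rcases pvGo_spec p (s.drop k) 0 with ⟨hval, hnone⟩ | ⟨j, hj, hval, hmatch, hfirst⟩
      · have hfind : PySem.Chars.find (s.drop k) p = -1 := hval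
        rw [if_pos (by simp [hfind])]
        have : pvMatches s p k = 0 := by
          apply pvMatches_zero
          intro i hi
          have h2 := hnone (i - k)
          rw [List.drop_drop] at h2
          rwa [show k + (i - k) = i by omega] at h2
        simp [this]
      · have hfind : PySem.Chars.find (s.drop k) p = (j : Int) := by simpa using hval
        have hjlen : j ≤ s.length - k := by simpa using hj
        rw [if_neg (by simp [hfind]; omega), if_neg (by simp [hfind])]
        have hstep : pvMatches s p k = pvMatches s p (k + j + 1) + 1 := by
          apply pvMatches_step s p k j (by omega)
          · have := hmatch; rw [List.drop_drop] at this; exact this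
          · intro i hi
            have := hfirst i hi
            rw [List.drop_drop] at this; exact this
        have harg : (k : Int) + (j : Int) + 1 = ((k + j + 1 : Nat) : Int) := by push_cast; ring
        rw [hfind, harg, ih s p (k + j + 1) (c + 1) (by omega) (by omega)]
        rw [hstep]; push_cast; ring

theorem pvCountOverlapping_eq (s p : List Char) :
    pvCountOverlapping s p = (pvMatches s p 0 : Int) := by
  unfold pvCountOverlapping
  have hle : pvMatches s p 0 ≤ s.length + 1 := by
    unfold pvMatches
    exact le_trans List.countP_le_length (by simp)
  simpa using pvCountOverlapAux_eq (s.length + 1) s p 0 0 (by omega) hle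

theorem pvNoMatch_far (t p : List Char) (i : Nat) (hpos : 0 < p.length) (h : t.length < i + p.length) :
    p.isPrefixOf (t.drop i) = false := by
  by_contra hc
  have hp : p.isPrefixOf (t.drop i) = true := by
    cases hb : p.isPrefixOf (t.drop i) with
    | false => exact absurd hb hc
    | true => rfl
  have := pvPrefix_length_le hp
  rw [List.length_drop] at this
  omega

-- a countP over range(len - m + 1) whose predicate agrees with "p matches at i"
-- on the in-range positions equals the number of match positions
theorem pvCountP_pyRange_eq (t p : List Char) (q : Int → Bool)
    (hq : ∀ i : Nat, i + p.length ≤ t.length → q (i : Int) = p.isPrefixOf (t.drop i)) :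
    (PySem.List.pyRange 0 ((t.length : Int) - p.length + 1) 1).countP q = pvMatches t p 0 := by
  have hrange : pvMatches t p 0 = (List.range (t.length + 1)).countP (fun i => p.isPrefixOf (t.drop i)) := by
    unfold pvMatches
    rw [List.range_eq_range']
    simp
  by_cases hm : p.length ≤ t.length
  · have hcast : (t.length : Int) - p.length + 1 = ((t.length - p.length + 1 : Nat) : Int) := by omega
    rw [hcast, PySem.List.pyRange_zero_natCast, List.countP_map]
    simp only [Function.comp_def]
    have hcong : List.countP (fun k : Nat => q (k : Int)) (List.range (t.length - p.length + 1))
        = List.countP (fun i => p.isPrefixOf (t.drop i)) (List.range (t.length - p.length + 1)) := by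
      apply List.countP_congr
      intro i hi
      simp only [List.mem_range] at hi
      rw [hq i (by omega)]
    rw [hcong, hrange]
    have hsplit : t.length + 1 = (t.length - p.length + 1) + p.length := by omega
    conv_rhs => rw [hsplit, List.range_add]
    rw [List.countP_append]
    have h2 : List.countP (fun i => p.isPrefixOf (t.drop i))
        ((List.range p.length).map (fun x => t.length - p.length + 1 + x)) = 0 := by
      apply List.countP_eq_zero.2
      intro y hy
      simp only [List.mem_map, List.mem_range] at hy
      obtain ⟨x, hx, rfl⟩ := hy
      simp [pvNoMatch_far t p (t.length - p.length + 1 + x) (by omega) (by omega)]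
    omega
  · have hneg : (t.length : Int) - p.length + 1 ≤ 0 := by omega
    have hempty : (PySem.List.pyRange 0 ((t.length : Int) - p.length + 1) 1).countP q = 0 := by
      apply List.countP_eq_zero.2
      intro y hy
      rw [PySem.List.mem_pyRange_one] at hy
      omega
    rw [hempty, hrange]
    symm
    apply List.countP_eq_zero.2
    intro i hi
    simp only [List.mem_range] at hi
    simp [pvNoMatch_far t p i (by omega) (by omega)]

-- the windows of length m of s, in position order (what B's inner loop tallies)
def pvWindows (s : List Char) (m : Nat) : List (List Char) :=
  (PySem.List.pyRange 0 ((s.length : Int) - m + 1) 1).map (fun i => (s.drop i.toNat).take m)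

-- how often p occurs among the length-m windows of s
theorem pvWindows_count (s p : List Char) (m : Nat) :
    ((pvWindows s m).count p : Int) = if m = p.length then ((pvMatches s p 0 : Nat) : Int) else 0 := by
  by_cases hm : m = p.length
  · subst hm
    rw [if_pos rfl]
    unfold pvWindows
    rw [List.count_eq_countP, List.countP_map]
    refine congrArg (fun n : Nat => (n : Int)) (pvCountP_pyRange_eq s p _ ?_)
    intro i hi
    simp only [Function.comp_def, Int.toNat_natCast]
    rw [Bool.eq_iff_iff, beq_iff_eq, List.isPrefixOf_iff_prefix, List.prefix_iff_eq_take]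
    exact ⟨Eq.symm, Eq.symm⟩
  · rw [if_neg hm]
    have hz : (pvWindows s m).count p = 0 := by
      rw [List.count_eq_zero]
      intro hmem
      unfold pvWindows at hmem
      simp only [List.mem_map] at hmem
      obtain ⟨y, hy, heq⟩ := hmem
      rw [PySem.List.mem_pyRange_one] at hy
      apply hm
      have hnn := Int.toNat_of_nonneg hy.1
      have hlen : ((s.drop y.toNat).take m).length = m := by
        simp only [List.length_take, List.length_drop]
        omega
      rw [heq] at hlen
      omega
    rw [hz]
    rfl

-- counting-dict lemma: tallying the windows of every length in `lengths` into d
-- adds, at key p, the number of windows equal to p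
theorem pvAddWindows_getD (s p : List Char) (lengths : List Nat) (d : PySem.Dict (List Char) Int) :
    (pvAddWindows d s lengths).getD p 0
      = d.getD p 0 + (lengths.map (fun m => ((pvWindows s m).count p : Int))).sum := by
  induction lengths generalizing d with
  | nil => simp [pvAddWindows]
  | cons m ms ih =>
    have hcons : pvAddWindows d s (m :: ms)
        = pvAddWindows ((pvWindows s m).foldl (fun d w => d.modify w 0 (· + 1)) d) s ms := by
      unfold pvAddWindows pvWindows
      rw [List.foldl_cons, List.foldl_map]
    rw [hcons, ih, PySem.Dict.getD_foldl_modify_add_one]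
    simp [add_assoc]

theorem pvCounts_getD (strs : List (List Char)) (lengths : List Nat) (p : List Char)
    (d : PySem.Dict (List Char) Int) :
    (strs.foldl (fun d s => pvAddWindows d s lengths) d).getD p 0
      = d.getD p 0 + (strs.map (fun s => (lengths.map (fun m => ((pvWindows s m).count p : Int))).sum)).sum := by
  induction strs generalizing d with
  | nil => simp
  | cons s ss ih => simp [List.foldl_cons, ih, pvAddWindows_getD, add_assoc]

theorem pvSum_indicator (l : List Nat) (a : Nat) (X : Int) (hnd : l.Nodup) (ha : a ∈ l) :
    (l.map (fun m => if m = a then X else 0)).sum = X := by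
  induction l with
  | nil => simp at ha
  | cons b l ih =>
    rw [List.nodup_cons] at hnd
    simp only [List.map_cons, List.sum_cons]
    by_cases hb : b = a
    · subst hb
      have hz : (l.map (fun m => if m = b then X else 0)).sum = 0 := by
        apply List.sum_eq_zero
        intro x hx
        obtain ⟨m, hm, rfl⟩ := List.mem_map.1 hx
        exact if_neg (fun h : m = b => hnd.1 (h ▸ hm))
      rw [if_pos rfl, hz, add_zero]
    · have ha' : a ∈ l := (List.mem_cons.1 ha).resolve_left (fun h => hb h.symm)
      rw [if_neg hb, ih hnd.2 ha', zero_add]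

theorem pvSum_swap {α β : Type} (l₁ : List α) (l₂ : List β) (g : α → β → Int) :
    (l₁.map (fun a => (l₂.map (g a)).sum)).sum
      = (l₂.map (fun b => (l₁.map (fun a => g a b)).sum)).sum := by
  induction l₁ with
  | nil => simp [List.map_const']
  | cons a l ih => simp only [List.map_cons, List.sum_cons, ih, PySem.List.sum_map_add_int]

-- ===== VERDICT (by name: the statement is the Claim_ definition above) =====
theorem find_cheat_patterns_spec : Claim_equal_find_cheat_patterns := by
  intro grid cheat_patterns _
  unfold Spec_find_cheat_patterns
  unfold find_cheat_patterns find_cheat_patterns_alt pvTransposed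
  simp only [PySem.List.foldl_add]
  set L := PySem.Set.ofList (cheat_patterns.map (fun p => p.toList.length)) with hLdef
  set cols := (List.range (pvMinLen grid)).map (fun j => grid.map (fun r => r.toList.getD j ' ')) with hcolsdef
  simp only [pvCounts_getD, PySem.Dict.getD_empty, zero_add]
  have hper : ∀ p ∈ cheat_patterns,
      ((grid.map String.toList ++ cols).map
          (fun s => (L.map (fun m => ((pvWindows s m).count p.toList : Int))).sum)).sum
        = ((grid.map String.toList ++ cols).map (fun s => ((pvMatches s p.toList 0 : Nat) : Int))).sum := by
    intro p hp
    apply congrArg List.sum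
    apply List.map_congr_left
    intro s _
    rw [List.map_congr_left (fun m _ => pvWindows_count s p.toList m)]
    exact pvSum_indicator L p.toList.length _ (PySem.Set.nodup_ofList _)
      ((PySem.Set.mem_ofList _ _).2 (List.mem_map_of_mem hp))
  rw [List.map_congr_left hper]
  rw [pvSum_swap cheat_patterns (grid.map String.toList ++ cols)
    (fun p s => ((pvMatches s p.toList 0 : Nat) : Int))]
  simp only [List.map_append, List.sum_append, List.map_map, Function.comp_def]
  simp only [pvCountOverlapping_eq]
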